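-- pv_equiv track=rewrite | github.com/pypi-data/pypi-mirror-404 | packages/moai-adk/moai_adk-1.12.11.tar.gz/moai_adk-1.12.11/src/moai_adk/utils/toon_utils.py | _is_tabular
-- ===== SOURCE A (Python) =====
-- from typing import Any
--
-- def _is_tabular(items: list[Any]) -> bool:
--     """Check if list of objects is suitable for tabular (CSV) format."""
--     if not items or not isinstance(items, list):
--         return False
--
--     if not all(isinstance(item, dict) for item in items):
--         return False
--
--     if len(items) == 0:
--         return False
--
--     # Check if all items have same keys
--     first_keys = set(items[0].keys())
--     return all(set(item.keys()) == first_keys for item in items)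
-- ===== SOURCE B (Python) =====
-- def _is_tabular(items):
--     """Check if list of objects is suitable for tabular (CSV) format."""
--     if not isinstance(items, list) or not items:
--         return False
--     signatures = set()
--     for item in items:
--         if not isinstance(item, dict):
--             return False
--         signatures.add(frozenset(item.keys()))
--     return len(signatures) == 1
-- ===== Notes on version B (the rewrite author's own statement) =====
-- stated objective: alternative
-- what changed: Instead of fixing the first item's key-set as a reference and comparing every item's keys against it, B accumulates the distinct frozenset key-signatures into a set in one pass and returns whether exactly one signature exists.
import Mathlib
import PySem

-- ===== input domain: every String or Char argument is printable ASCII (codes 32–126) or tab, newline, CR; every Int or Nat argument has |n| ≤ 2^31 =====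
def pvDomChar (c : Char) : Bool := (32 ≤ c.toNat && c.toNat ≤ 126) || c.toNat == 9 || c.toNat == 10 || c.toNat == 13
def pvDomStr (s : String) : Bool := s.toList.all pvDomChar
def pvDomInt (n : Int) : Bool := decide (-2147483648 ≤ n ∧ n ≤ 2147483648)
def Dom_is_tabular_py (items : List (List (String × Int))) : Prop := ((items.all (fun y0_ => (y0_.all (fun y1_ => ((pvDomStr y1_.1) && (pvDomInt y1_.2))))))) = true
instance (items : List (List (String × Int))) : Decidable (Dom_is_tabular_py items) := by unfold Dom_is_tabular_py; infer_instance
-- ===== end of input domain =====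

-- B replaces A's compare-everything-to-the-first-key-set scan by accumulating the distinct
-- key-signatures into a set and testing that exactly one exists (alternative decomposition, same cost).

-- ===== PORT A =====
-- 'if not items or not isinstance(items, list)': isinstance is always true under the types;
-- the all-dicts and len(items)==0 guards are vacuous too (every element IS a dict, len ≠ 0 here).
def is_tabular_py (items : List (List (String × Int))) : Bool :=
  match items with
  | [] => false
  | first :: _ =>
    let firstKeys := PySem.Set.ofList (first.map Prod.fst)
    items.all (fun item => PySem.Set.equal (PySem.Set.ofList (item.map Prod.fst)) firstKeys)

-- ===== PORT B =====
-- signatures.add(frozenset(item.keys())): a set of frozensets — membership is frozenset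
-- equality, i.e. set equality of the key lists; exact hand port of that add.
def addSig (sigs : List (PySem.Set String)) (s : PySem.Set String) : List (PySem.Set String) :=
  if sigs.any (fun t => PySem.Set.equal t s) then sigs else sigs ++ [s]

def is_tabular_py_alt (items : List (List (String × Int))) : Bool :=
  match items with
  | [] => false
  | _ :: _ =>
    let sigs := items.foldl (fun sigs item => addSig sigs (PySem.Set.ofList (item.map Prod.fst))) []
    sigs.length == 1

-- ===== PRECONDITION & SPEC =====
def Spec_is_tabular_py (items : List (List (String × Int))) (out : Bool) : Prop := out = is_tabular_py_alt items
instance (items : List (List (String × Int))) (out : Bool) : Decidable (Spec_is_tabular_py items out) := by unfold Spec_is_tabular_py; infer_instance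

-- ===== CLAIM (what is proved, stated in full; the proofs are below) =====
def Claim_equal_is_tabular_py : Prop := ∀ (items : List (List (String × Int))), Dom_is_tabular_py items → Spec_is_tabular_py items (is_tabular_py items)

-- ===== LEMMAS AND PROOFS =====

lemma set_equal_comm (s t : PySem.Set String) : PySem.Set.equal s t = PySem.Set.equal t s := by
  rw [Bool.eq_iff_iff, PySem.Set.equal_iff, PySem.Set.equal_iff]
  exact ⟨fun h x => (h x).symm, fun h x => (h x).symm⟩

lemma set_equal_refl (s : PySem.Set String) : PySem.Set.equal s s = true :=
  (PySem.Set.equal_iff _ _).mpr (fun _ => Iff.rfl)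

lemma foldl_addSig_length_le (f : List (String × Int) → PySem.Set String)
    (l : List (List (String × Int))) (acc : List (PySem.Set String)) :
    acc.length ≤ (l.foldl (fun sigs item => addSig sigs (f item)) acc).length := by
  induction l generalizing acc with
  | nil => simp
  | cons it l ih =>
    refine le_trans ?_ (ih (addSig acc (f it)))
    unfold addSig
    split <;> simp

lemma foldl_addSig_singleton (s0 : PySem.Set String)
    (l : List (List (String × Int))) :
    ((l.foldl (fun sigs item =>
        addSig sigs (PySem.Set.ofList (item.map Prod.fst))) [s0]).length == 1)
      = l.all (fun it => PySem.Set.equal (PySem.Set.ofList (it.map Prod.fst)) s0) := by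
  induction l with
  | nil => rfl
  | cons it l ih =>
    simp only [List.foldl_cons, List.all_cons]
    by_cases h : PySem.Set.equal s0 (PySem.Set.ofList (it.map Prod.fst)) = true
    · have h' : PySem.Set.equal (PySem.Set.ofList (it.map Prod.fst)) s0 = true := by
        rw [set_equal_comm]; exact h
      have hadd : addSig [s0] (PySem.Set.ofList (it.map Prod.fst)) = [s0] := by
        unfold addSig; simp [h]
      rw [hadd, ih, h', Bool.true_and]
    · have h' : PySem.Set.equal (PySem.Set.ofList (it.map Prod.fst)) s0 = false := by
        rw [set_equal_comm]; exact Bool.eq_false_iff.mpr h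
      have hadd : addSig [s0] (PySem.Set.ofList (it.map Prod.fst)) = [s0, PySem.Set.ofList (it.map Prod.fst)] := by
        unfold addSig; simp [h]
      rw [hadd, h', Bool.false_and]
      have hle := foldl_addSig_length_le (fun item => PySem.Set.ofList (item.map Prod.fst)) l
        [s0, PySem.Set.ofList (it.map Prod.fst)]
      simp only [List.length_cons, List.length_nil] at hle
      have : (l.foldl (fun sigs item => addSig sigs (PySem.Set.ofList (item.map Prod.fst)))
          [s0, PySem.Set.ofList (it.map Prod.fst)]).length ≠ 1 := by omega
      simpa using this

-- ===== VERDICT (by name: the statement is the Claim_ definition above) =====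
theorem is_tabular_py_spec : Claim_equal_is_tabular_py := by
  intro items _
  unfold Spec_is_tabular_py is_tabular_py is_tabular_py_alt
  match items with
  | [] => rfl
  | first :: rest =>
    simp only [List.foldl_cons, List.all_cons]
    have hadd : addSig [] (PySem.Set.ofList (first.map Prod.fst))
        = [PySem.Set.ofList (first.map Prod.fst)] := by unfold addSig; simp
    rw [hadd, foldl_addSig_singleton, set_equal_refl, Bool.true_and]
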